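-- pv_equiv track=rewrite | github.com/brettadin/spectrasuite | app/ui/similarity.py | _display_labels
-- ===== SOURCE A (Python) =====
-- from collections.abc import Sequence
--
-- def _display_labels(keys: Sequence[str], lookup: dict[str, str]) -> list[str]:
--     counts: dict[str, int] = {}
--     labels: list[str] = []
--     for key in keys:
--         base = lookup.get(key, key)
--         count = counts.get(base, 0) + 1
--         counts[base] = count
--         if count == 1:
--             labels.append(base)
--         else:
--             labels.append(f"{base} ({count})")
--     return labels
-- ===== SOURCE B (Python) =====
-- def _display_labels(keys, lookup):
--     positions = {}
--     for i, key in enumerate(keys):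
--         positions.setdefault(lookup.get(key, key), []).append(i)
--     labels = [""] * len(keys)
--     for base, idxs in positions.items():
--         for rank, i in enumerate(idxs, start=1):
--             labels[i] = base if rank == 1 else f"{base} ({rank})"
--     return labels
-- ===== Notes on version B (the rewrite author's own statement) =====
-- stated objective: alternative
-- what changed: B replaces A's streaming counter-dict with a two-pass grouping: it first builds a dict mapping each base to the list of indices where it occurs, then fills a preallocated result list by writing each group's labels at their indices, numbered by rank within the group.
import Mathlib
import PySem

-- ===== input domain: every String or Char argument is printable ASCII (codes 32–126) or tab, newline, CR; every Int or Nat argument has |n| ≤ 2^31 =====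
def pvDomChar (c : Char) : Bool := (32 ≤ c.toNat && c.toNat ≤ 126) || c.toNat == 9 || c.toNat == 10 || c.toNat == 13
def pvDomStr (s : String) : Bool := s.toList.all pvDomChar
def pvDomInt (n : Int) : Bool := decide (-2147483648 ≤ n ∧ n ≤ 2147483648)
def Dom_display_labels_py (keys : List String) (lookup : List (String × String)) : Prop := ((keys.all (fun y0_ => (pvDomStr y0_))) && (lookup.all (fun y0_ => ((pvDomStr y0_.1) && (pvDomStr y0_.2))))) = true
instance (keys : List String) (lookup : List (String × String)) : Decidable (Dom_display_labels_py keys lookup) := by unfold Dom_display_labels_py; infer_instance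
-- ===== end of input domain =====

-- B replaces A's streaming counter dict with a two-pass grouping: it first maps each base to
-- the list of positions where it occurs, then fills a preallocated result by rank within each
-- group (alternative decomposition, same cost; not claimed faster).

-- ===== PORT A =====
-- counts: dict[str,int]; labels accumulated in stream order; base = lookup.get(key, key)
def display_labels_py (keys : List String) (lookup : List (String × String)) : List String :=
  let lk : PySem.Dict String String := PySem.Dict.ofList lookup
  (keys.foldl (fun (st : PySem.Dict String Int × List String) key =>
      let base := lk.getD key key
      let count : Int := st.1.getD base 0 + 1
      (st.1.insert base count,
       st.2 ++ [if count = 1 then base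
                else base ++ " (" ++ PySem.Int.toStr count ++ ")"]))
    (PySem.Dict.empty, [])).2

-- ===== PORT B =====
-- positions.setdefault(lookup.get(key, key), []).append(i); then fill labels[i] by rank
def display_labels_py_alt (keys : List String) (lookup : List (String × String)) : List String :=
  let lk : PySem.Dict String String := PySem.Dict.ofList lookup
  let positions : PySem.Dict String (List Int) :=
    (PySem.List.enumerate keys).foldl
      (fun d p => d.modify (lk.getD p.2 p.2) [] (· ++ [p.1])) PySem.Dict.empty
  let labels0 : List String := List.replicate keys.length ""
  positions.items.foldl (fun labels q =>
    (PySem.List.enumerate q.2 1).foldl (fun l r =>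
      PySem.List.pySetD l r.2
        (if r.1 = 1 then q.1 else q.1 ++ " (" ++ PySem.Int.toStr r.1 ++ ")")) labels) labels0

-- ===== PRECONDITION & SPEC =====
def Spec_display_labels_py (keys : List String) (lookup : List (String × String)) (out : List String) : Prop := out = display_labels_py_alt keys lookup
instance (keys : List String) (lookup : List (String × String)) (out : List String) : Decidable (Spec_display_labels_py keys lookup out) := by unfold Spec_display_labels_py; infer_instance

-- ===== CLAIM (what is proved, stated in full; the proofs are below) =====
def Claim_equal_display_labels_py : Prop := ∀ (keys : List String) (lookup : List (String × String)), Dom_display_labels_py keys lookup → Spec_display_labels_py keys lookup (display_labels_py keys lookup)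

-- ===== LEMMAS AND PROOFS =====

-- label of an occurrence of b whose already-seen prefix of bases is pre
def pvLabel (pre : List String) (b : String) : String :=
  let count : Int := (pre.count b : Int) + 1
  if count = 1 then b else b ++ " (" ++ PySem.Int.toStr count ++ ")"

-- reference result: labels of the remaining keys given the already-seen base prefix
def pvSpec (pre rest : List String) : List String :=
  match rest with
  | [] => []
  | b :: t => pvLabel pre b :: pvSpec (pre ++ [b]) t

-- positions (as Ints) at which base b occurs in ks, enumerated from s
def pvIdx (g : String → String) (ks : List String) (s : Int) (b : String) : List Int :=
  ((PySem.List.enumerate ks s).filter (fun p => g p.2 == b)).map (·.1)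

lemma a_fold (lk : PySem.Dict String String) (rest : List String) :
    ∀ (d : PySem.Dict String Int) (acc pre : List String),
    (∀ b, d.getD b 0 = (pre.count b : Int)) →
    (rest.foldl (fun (st : PySem.Dict String Int × List String) key =>
        let base := lk.getD key key
        let count : Int := st.1.getD base 0 + 1
        (st.1.insert base count,
         st.2 ++ [if count = 1 then base
                  else base ++ " (" ++ PySem.Int.toStr count ++ ")"]))
      (d, acc)).2 = acc ++ pvSpec pre (rest.map (fun key => lk.getD key key)) := by
  induction rest with
  | nil => intro d acc pre _; simp [pvSpec]
  | cons k t ih =>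
    intro d acc pre h
    simp only [List.foldl_cons, List.map_cons]
    rw [ih (d.insert (lk.getD k k) (d.getD (lk.getD k k) 0 + 1))
        (acc ++ [if d.getD (lk.getD k k) 0 + 1 = 1 then lk.getD k k
                 else lk.getD k k ++ " (" ++ PySem.Int.toStr (d.getD (lk.getD k k) 0 + 1) ++ ")"])
        (pre ++ [lk.getD k k]) ?_]
    · simp only [pvSpec, pvLabel, h (lk.getD k k), List.append_assoc, List.singleton_append]
    · intro b'
      rw [PySem.Dict.getD_insert, List.count_append]
      by_cases hb : b' = lk.getD k k
      · simp [hb, h (lk.getD k k)]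
      · simp [hb, h b', Ne.symm hb]

lemma pvSpec_getElem? (rest : List String) : ∀ (pre : List String) (j : Nat),
    (pvSpec pre rest)[j]? =
      if h : j < rest.length then some (pvLabel (pre ++ rest.take j) (rest[j])) else none := by
  induction rest with
  | nil => intro pre j; simp [pvSpec]
  | cons b t ih =>
    intro pre j
    cases j with
    | zero => simp [pvSpec]
    | succ j =>
      simp only [pvSpec, List.getElem?_cons_succ, ih (pre ++ [b]) j, List.length_cons,
        List.take_succ_cons, List.getElem_cons_succ, List.append_assoc, List.singleton_append]
      split_ifs with h1 h2 h2 <;> first | rfl | omega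

lemma pvSpec_length (rest : List String) : ∀ pre, (pvSpec pre rest).length = rest.length := by
  induction rest with
  | nil => intro pre; simp [pvSpec]
  | cons b t ih => intro pre; simp [pvSpec, ih]

-- the grouping loop: each base's value is the list of its positions
lemma getD_posfold (g : String → String) (l : List (Int × String)) :
    ∀ (d : PySem.Dict String (List Int)) (b : String),
    (l.foldl (fun d p => d.modify (g p.2) [] (· ++ [p.1])) d).getD b [] =
      d.getD b [] ++ (l.filter (fun p => g p.2 == b)).map (·.1) := by
  induction l with
  | nil => intro d b; simp
  | cons p t ih =>
    intro d b
    simp only [List.foldl_cons, ih, List.filter_cons]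
    rw [PySem.Dict.getD_modify]
    by_cases hb : b = g p.2
    · simp [hb]
    · simp [hb, beq_false_of_ne (Ne.symm hb)]

lemma mem_pvIdx (g : String → String) (b : String) (ks : List String) : ∀ (s x : Int),
    x ∈ pvIdx g ks s b ↔ ∃ (k : Nat) (h : k < ks.length), x = s + k ∧ g ks[k] = b := by
  induction ks with
  | nil => intro s x; simp [pvIdx]
  | cons a t ih =>
    intro s x
    simp only [pvIdx, PySem.List.enumerate_cons, List.filter_cons] at *
    constructor
    · intro hx
      by_cases ha : g a = b
      · simp only [ha, beq_self_eq_true, if_true, List.map_cons, List.mem_cons] at hx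
        rcases hx with hx | hx
        · exact ⟨0, by simp, by simpa using hx, ha⟩
        · rcases (ih (s + 1) x).mp hx with ⟨k, hk, hxk, hgb⟩
          exact ⟨k + 1, by simpa using Nat.succ_lt_succ hk, by push_cast; omega, hgb⟩
      · simp only [beq_iff_eq, ha, if_false] at hx
        rcases (ih (s + 1) x).mp hx with ⟨k, hk, hxk, hgb⟩
        exact ⟨k + 1, by simpa using Nat.succ_lt_succ hk, by push_cast; omega, hgb⟩
    · rintro ⟨k, hk, hxk, hgb⟩
      cases k with
      | zero =>
        simp only [List.getElem_cons_zero] at hgb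
        simp [hgb, hxk]
      | succ k =>
        have : x ∈ pvIdx g t (s + 1) b := (ih (s + 1) x).mpr ⟨k, by simpa using Nat.lt_of_succ_lt_succ hk, by push_cast at hxk ⊢; omega, by simpa using hgb⟩
        by_cases ha : g a = b <;> simp [ha, pvIdx] at this ⊢ <;> simp [this]

lemma le_of_mem_pvIdx (g : String → String) (b : String) (ks : List String) (s x : Int)
    (hx : x ∈ pvIdx g ks s b) : s ≤ x := by
  rcases (mem_pvIdx g b ks s x).mp hx with ⟨k, _, hxk, _⟩
  omega

lemma nodup_pvIdx (g : String → String) (b : String) (ks : List String) : ∀ (s : Int),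
    (pvIdx g ks s b).Nodup := by
  induction ks with
  | nil => intro s; simp [pvIdx]
  | cons a t ih =>
    intro s
    by_cases ha : g a = b
    · have : pvIdx g (a :: t) s b = s :: pvIdx g t (s + 1) b := by
        simp [pvIdx, PySem.List.enumerate_cons, ha]
      rw [this, List.nodup_cons]
      exact ⟨fun hmem => by have := le_of_mem_pvIdx g b t (s + 1) s hmem; omega, ih (s + 1)⟩
    · have : pvIdx g (a :: t) s b = pvIdx g t (s + 1) b := by
        simp [pvIdx, PySem.List.enumerate_cons, beq_false_of_ne ha]
      rw [this]; exact ih (s + 1)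

lemma idxOf_pvIdx (g : String → String) (b : String) (ks : List String) :
    ∀ (s : Int) (j : Nat) (hj : j < ks.length), g ks[j] = b →
    (pvIdx g ks s b).idxOf (s + (j : Int)) = ((ks.take j).map g).count b := by
  induction ks with
  | nil => intro s j hj; simp at hj
  | cons a t ih =>
    intro s j hj hgb
    by_cases ha : g a = b
    · have hP : pvIdx g (a :: t) s b = s :: pvIdx g t (s + 1) b := by
        simp [pvIdx, PySem.List.enumerate_cons, ha]
      cases j with
      | zero => simp [hP]
      | succ j =>
        have := ih (s + 1) j (by simpa using Nat.lt_of_succ_lt_succ hj) (by simpa using hgb)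
        rw [hP]
        simp only [List.idxOf_cons,
          beq_false_of_ne (show s ≠ s + ((j + 1 : Nat) : Int) by push_cast; omega), cond_false]
        have harg : s + ((j + 1 : Nat) : Int) = (s + 1) + (j : Int) := by push_cast; ring
        rw [harg, this]
        simp [ha]
    · have hP : pvIdx g (a :: t) s b = pvIdx g t (s + 1) b := by
        simp [pvIdx, PySem.List.enumerate_cons, beq_false_of_ne ha]
      cases j with
      | zero => simp at hgb; exact absurd hgb ha
      | succ j =>
        have := ih (s + 1) j (by simpa using Nat.lt_of_succ_lt_succ hj) (by simpa using hgb)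
        rw [hP]
        have harg : s + ((j + 1 : Nat) : Int) = (s + 1) + (j : Int) := by push_cast; ring
        rw [harg, this]
        simp [ha]

-- one group's write loop: sets exactly the listed positions, value by rank
lemma write_fold (f : Int → String) (idxs : List Int) : ∀ (s : Int) (labels : List String),
    idxs.Nodup → (∀ i ∈ idxs, 0 ≤ i ∧ i < (labels.length : Int)) →
    ((PySem.List.enumerate idxs s).foldl
        (fun l r => PySem.List.pySetD l r.2 (f r.1)) labels).length = labels.length ∧
    ∀ j : Nat, ((PySem.List.enumerate idxs s).foldl
        (fun l r => PySem.List.pySetD l r.2 (f r.1)) labels)[j]? =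
      if (j : Int) ∈ idxs then some (f (s + idxs.idxOf (j : Int))) else labels[j]? := by
  induction idxs with
  | nil => intro s labels _ _; simp
  | cons i t ih =>
    intro s labels hnd hrange
    have hi := hrange i (by simp)
    have hset : PySem.List.pySetD labels i (f s) = labels.set i.toNat (f s) :=
      PySem.List.pySetD_of_nonneg labels (f s) hi.1
    have hlen' : (labels.set i.toNat (f s)).length = labels.length := by simp
    have ihres := ih (s + 1) (labels.set i.toNat (f s)) (List.Nodup.of_cons hnd)
      (fun x hx => by have := hrange x (List.mem_cons_of_mem _ hx); omega)
    rw [PySem.List.enumerate_cons]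
    constructor
    · simp only [List.foldl_cons, hset]
      rw [ihres.1, hlen']
    · intro j
      simp only [List.foldl_cons, hset]
      rw [ihres.2 j]
      by_cases hji : (j : Int) = i
      · have hjt : (j : Int) ∉ t := by
          rw [hji]; exact (List.nodup_cons.mp hnd).1
        have hjlt : j < labels.length := by omega
        have hij : i.toNat = j := by omega
        rw [if_neg hjt, if_pos (by simp [hji]), hij,
            List.getElem?_set_eq_of_lt (f s) hjlt]
        simp [← hji]
      · by_cases hjt : (j : Int) ∈ t
        · rw [if_pos hjt, if_pos (List.mem_cons_of_mem _ hjt)]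
          simp only [List.idxOf_cons,
            beq_false_of_ne (show i ≠ (j : Int) from fun h => hji h.symm), cond_false]
          congr 2
          push_cast
          ring
        · rw [if_neg hjt, if_neg (by simp [hji, hjt]),
              List.getElem?_set_ne (show i.toNat ≠ j by omega)]

-- the fill loop over the grouped items
lemma outer_fold (g : String → String) (keys : List String) (items : List (String × List Int)) :
    ∀ (labels : List String), labels.length = keys.length →
    (∀ q ∈ items, q.2 = pvIdx g keys 0 q.1) →
    (items.foldl (fun labels q =>
        (PySem.List.enumerate q.2 1).foldl (fun l r =>
          PySem.List.pySetD l r.2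
            (if r.1 = 1 then q.1 else q.1 ++ " (" ++ PySem.Int.toStr r.1 ++ ")")) labels)
      labels).length = keys.length ∧
    ∀ (j : Nat) (hj : j < keys.length),
      (items.foldl (fun labels q =>
          (PySem.List.enumerate q.2 1).foldl (fun l r =>
            PySem.List.pySetD l r.2
              (if r.1 = 1 then q.1 else q.1 ++ " (" ++ PySem.Int.toStr r.1 ++ ")")) labels)
        labels)[j]? =
        if g keys[j] ∈ items.map (·.1)
        then some (pvLabel ((keys.take j).map g) (g keys[j]))
        else labels[j]? := by
  induction items with
  | nil => intro labels hlen _; simp [hlen]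
  | cons q rest ih =>
    intro labels hlen hitems
    have hq := hitems q (by simp)
    have hnd : q.2.Nodup := hq ▸ nodup_pvIdx g q.1 keys 0
    have hrange : ∀ i ∈ q.2, 0 ≤ i ∧ i < (labels.length : Int) := by
      intro i hi
      rw [hq] at hi
      rcases (mem_pvIdx g q.1 keys 0 i).mp hi with ⟨k, hk, hik, _⟩
      constructor <;> omega
    have hw := write_fold (fun r => if r = 1 then q.1 else q.1 ++ " (" ++ PySem.Int.toStr r ++ ")")
      q.2 1 labels hnd hrange
    have hrest := ih _ (hw.1.trans hlen) (fun p hp => hitems p (List.mem_cons_of_mem _ hp))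
    constructor
    · simpa using hrest.1
    · intro j hj
      simp only [List.foldl_cons]
      rw [hrest.2 j hj, hw.2 j]
      by_cases hmem : g keys[j] ∈ rest.map (·.1)
      · simp [hmem]
      · simp only [hmem, if_false, List.map_cons, List.mem_cons]
        by_cases hb : g keys[j] = q.1
        · have hjP : (j : Int) ∈ q.2 := by
            rw [hq]
            exact (mem_pvIdx g q.1 keys 0 (j : Int)).mpr ⟨j, hj, by omega, hb⟩
          have hidx : q.2.idxOf ((j : Int)) = ((keys.take j).map g).count q.1 := by
            rw [hq]
            have := idxOf_pvIdx g q.1 keys 0 j hj hb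
            simpa using this
          simp only [hb, true_or, if_true, hjP, if_true, hidx, pvLabel]
          rw [Int.add_comm 1 _]
        · have hjP : (j : Int) ∉ q.2 := by
            rw [hq]
            intro hmem'
            rcases (mem_pvIdx g q.1 keys 0 (j : Int)).mp hmem' with ⟨k, hk, hik, hgb⟩
            have hkj : k = j := by omega
            subst hkj
            exact hb hgb
          simp [hb, hjP]

-- ===== VERDICT is below; main equality =====
theorem pv_main (keys : List String) (lookup : List (String × String)) :
    display_labels_py keys lookup = display_labels_py_alt keys lookup := by
  simp only [display_labels_py, display_labels_py_alt]
  set g : String → String := fun key => (PySem.Dict.ofList lookup).getD key key with hg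
  rw [a_fold (PySem.Dict.ofList lookup) keys PySem.Dict.empty [] []
      (by intro b; simp [PySem.Dict.getD_empty])]
  simp only [List.nil_append, ← hg]
  set positions : PySem.Dict String (List Int) :=
    (PySem.List.enumerate keys).foldl
      (fun d p => d.modify (g p.2) [] (· ++ [p.1])) PySem.Dict.empty with hpos
  have hkeysnd : positions.keys.Nodup := by
    rw [hpos]
    exact PySem.Dict.nodup_keys_foldl_modify_key _ _ _ _ _ PySem.Dict.nodup_keys_empty
  have hitemsmap : positions.items = positions.keys.map (fun b => (b, positions.getD b [])) :=
    PySem.Dict.items_eq_map_keys positions hkeysnd []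
  have hgetD : ∀ b, positions.getD b [] = pvIdx g keys 0 b := by
    intro b
    rw [hpos, getD_posfold g (PySem.List.enumerate keys) PySem.Dict.empty b]
    simp [pvIdx, PySem.Dict.getD_empty]
  have hitems : ∀ q ∈ positions.items, q.2 = pvIdx g keys 0 q.1 := by
    intro q hqmem
    rw [hitemsmap] at hqmem
    rcases List.mem_map.mp hqmem with ⟨b, _, hb⟩
    rw [← hb]
    exact hgetD b
  have hO := outer_fold g keys positions.items (List.replicate keys.length "")
    (by simp) hitems
  have hcover : ∀ (j : Nat) (hj : j < keys.length), g keys[j] ∈ positions.items.map (·.1) := by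
    intro j hj
    rw [hitemsmap]
    have : positions.keys = PySem.Set.update (PySem.Dict.empty : PySem.Dict String (List Int)).keys
        ((PySem.List.enumerate keys).map (fun p => g p.2)) := by
      rw [hpos]
      exact PySem.Dict.keys_foldl_modify_key _ _ _ _ _
    have hmemk : g keys[j] ∈ positions.keys := by
      rw [this]
      simp only [PySem.Dict.keys_empty, PySem.Set.update_nil_left]
      rw [PySem.Set.mem_ofList]
      exact List.mem_map.mpr ⟨((j : Int), keys[j]), by
        rw [PySem.List.mem_enumerate_iff]; exact ⟨j, hj, by simp⟩, rfl⟩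
    simpa using hmemk
  apply List.ext_getElem?
  intro j
  by_cases hj : j < keys.length
  · rw [hO.2 j hj, if_pos (hcover j hj)]
    rw [pvSpec_getElem?]
    rw [dif_pos (by simpa using hj)]
    simp [List.map_take]
  · have h1 : (pvSpec [] (keys.map g)).length ≤ j := by
      rw [pvSpec_length]; simpa using Nat.le_of_not_lt hj
    rw [List.getElem?_eq_none h1,
        List.getElem?_eq_none (by rw [hO.1]; exact Nat.le_of_not_lt hj)]

-- ===== VERDICT (by name: the statement is the Claim_ definition above) =====
theorem display_labels_py_spec : Claim_equal_display_labels_py := by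
  intro keys lookup _
  unfold Spec_display_labels_py
  exact pv_main keys lookup
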